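-- pv_equiv track=rewrite | github.com/Manelygb/isdbi_submission | backend/ch1_onsite.py | parse_classifier_output
-- ===== SOURCE A (Python) =====
-- def parse_classifier_output(output):
--
--     classification = None
--     justification = None
--     for line in output['text'].strip().split('\n'):
--         if line.lower().startswith("classification="):
--             classification = line.split("=", 1)[1].strip()
--         elif line.lower().startswith("justification="):
--             justification = line.split("=", 1)[1].strip()
--     return classification, justification
-- ===== SOURCE B (Python) =====
-- def parse_classifier_output(output):
--     table = {}
--     for line in output['text'].strip().split('\n'):
--         parts = line.split('=', 1)
--         if len(parts) == 2:
--             table[parts[0].lower()] = parts[1].strip()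
--     return table.get('classification'), table.get('justification')
-- ===== Notes on version B (the rewrite author's own statement) =====
-- stated objective: idiomatic
-- what changed: Replaces the per-keyword if/elif branch chain and two mutable variables by one generic key=value table built in a single pass (last occurrence wins by dict overwrite), with the two answers read out by dict lookups at the end.
import Mathlib
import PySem

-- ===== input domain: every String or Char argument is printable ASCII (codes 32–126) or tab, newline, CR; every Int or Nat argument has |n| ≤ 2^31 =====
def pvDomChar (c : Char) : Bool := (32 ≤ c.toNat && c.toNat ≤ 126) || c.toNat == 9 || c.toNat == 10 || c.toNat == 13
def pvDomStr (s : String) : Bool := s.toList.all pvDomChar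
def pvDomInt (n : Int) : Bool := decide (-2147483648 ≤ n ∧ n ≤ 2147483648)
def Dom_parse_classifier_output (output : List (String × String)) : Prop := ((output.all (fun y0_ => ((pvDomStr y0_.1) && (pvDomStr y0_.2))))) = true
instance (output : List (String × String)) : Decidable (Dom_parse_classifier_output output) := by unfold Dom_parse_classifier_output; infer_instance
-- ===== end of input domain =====

-- B replaces A's per-keyword if/elif chain by one generic key=value table built in a single
-- pass (dict overwrite = last occurrence wins), read out by two lookups; same cost, more idiomatic.

-- ===== PORT A =====
-- line.split("=", 1)[1].strip(); the "" default is unreachable in A: the guarding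
-- startswith("…=") ensures '=' occurs in line, so the split has a part at index 1.
def pcoValue (line : String) : String :=
  PySem.Str.strip ((PySem.List.pyGet? ((PySem.Str.splitMax? line "=" 1).getD []) 1).getD "")

-- the body of A's for-loop over (classification, justification)
def pcoStepA (st : Option String × Option String) (line : String) :
    Option String × Option String :=
  if PySem.Str.startswith (PySem.Str.lower line) "classification=" then
    (some (pcoValue line), st.2)
  else if PySem.Str.startswith (PySem.Str.lower line) "justification=" then
    (st.1, some (pcoValue line))
  else st

def parse_classifier_output (output : List (String × String)) : Option String × Option String :=
  match (PySem.Dict.ofList output).get? "text" with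
  | none => (none, none)   -- Python raises KeyError here; excluded by Pre_
  | some text =>
      ((PySem.Str.split? (PySem.Str.strip text) "\n").getD []).foldl pcoStepA (none, none)

-- ===== PORT B =====
-- the body of B's for-loop over the table
def pcoStepB (t : PySem.Dict String String) (line : String) : PySem.Dict String String :=
  match (PySem.Str.splitMax? line "=" 1).getD [] with
  | [k, v] => t.insert (PySem.Str.lower k) (PySem.Str.strip v)
  | _ => t

-- B's table-building loop: table = {}; for line in lines: ...
def pcoTable (lines : List String) : PySem.Dict String String :=
  lines.foldl pcoStepB PySem.Dict.empty

def parse_classifier_output_alt (output : List (String × String)) : Option String × Option String :=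
  match (PySem.Dict.ofList output).get? "text" with
  | none => (none, none)   -- Python raises KeyError here; excluded by Pre_
  | some text =>
      ((pcoTable ((PySem.Str.split? (PySem.Str.strip text) "\n").getD [])).get? "classification",
       (pcoTable ((PySem.Str.split? (PySem.Str.strip text) "\n").getD [])).get? "justification")

-- ===== PRECONDITION & SPEC =====
-- Pre_ excludes exactly the inputs without a "text" key, on which the Python A raises KeyError.
def Pre_parse_classifier_output (output : List (String × String)) : Prop :=
  (output.any (fun p => p.1 == "text")) = true
instance (output : List (String × String)) : Decidable (Pre_parse_classifier_output output) := by
  unfold Pre_parse_classifier_output; infer_instance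

def pvWitness_parse_classifier_output : (List (String × String)) :=
  [("text", "Classification=Yes\njustification =no\njustification= ok ")]

def Spec_parse_classifier_output (output : List (String × String)) (out : Option String × Option String) : Prop := out = parse_classifier_output_alt output
instance (output : List (String × String)) (out : Option String × Option String) : Decidable (Spec_parse_classifier_output output out) := by unfold Spec_parse_classifier_output; infer_instance

-- ===== CLAIM (what is proved, stated in full; the proofs are below) =====
def Claim_equal_parse_classifier_output : Prop := ∀ (output : List (String × String)), Dom_parse_classifier_output output → Pre_parse_classifier_output output → Spec_parse_classifier_output output (parse_classifier_output output)

-- ===== LEMMAS AND PROOFS =====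

theorem pco_lowerChar_eq {c : Char} (h : PySem.Chars.lowerChar c = '=') : c = '=' := by
  unfold PySem.Chars.lowerChar PySem.Chars.isupper at h
  split at h
  · next hu =>
    exfalso
    simp only [Bool.and_eq_true, decide_eq_true_eq] at hu
    have hA : 65 ≤ c.toNat := hu.1
    have hZ : c.toNat ≤ 90 := hu.2
    have hv : (c.toNat + 32).isValidChar := Or.inl (by omega)
    have h' := congrArg Char.toNat h
    rw [Char.toNat_ofNat, if_pos hv] at h'
    have : c.toNat + 32 = 61 := by simpa using h'
    omega
  · exact h

theorem pco_mem_lower {cs : List Char} (h : '=' ∈ PySem.Chars.lower cs) : '=' ∈ cs := by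
  unfold PySem.Chars.lower at h
  obtain ⟨c, hc, he⟩ := List.mem_map.mp h
  exact (pco_lowerChar_eq he) ▸ hc

theorem pco_lower_append (pre rest : List Char) :
    PySem.Chars.lower (pre ++ '=' :: rest) =
      PySem.Chars.lower pre ++ '=' :: PySem.Chars.lower rest := by
  simp only [PySem.Chars.lower, List.map_append, List.map_cons]
  rfl

-- go with maxsplit budget 0 returns the remainder as one piece
theorem pco_go_zero (fuel : Nat) (l cur : List Char) (acc : List (List Char)) :
    PySem.Chars.splitOnMax.go ['='] fuel 0 l cur acc =
      ((cur.reverse ++ l) :: acc).reverse := by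
  cases fuel with
  | zero => rfl
  | succ f =>
    cases l with
    | nil => simp [PySem.Chars.splitOnMax.go]
    | cons c rest => simp [PySem.Chars.splitOnMax.go]

-- go on a separator-free remainder
theorem pco_go_no (l : List Char) (fuel : Nat) (cur : List Char) (acc : List (List Char))
    (h : '=' ∉ l) (hf : l.length ≤ fuel) :
    PySem.Chars.splitOnMax.go ['='] fuel 1 l cur acc =
      ((cur.reverse ++ l) :: acc).reverse := by
  induction l generalizing fuel cur with
  | nil =>
    cases fuel with
    | zero => rfl
    | succ f => simp [PySem.Chars.splitOnMax.go]
  | cons c rest ih =>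
    cases fuel with
    | zero => simp at hf
    | succ f =>
      have hc : c ≠ '=' := fun hcc => h (hcc ▸ List.mem_cons_self ..)
      have hpre : (['='] : List Char).isPrefixOf (c :: rest) = false := by
        simp [List.isPrefixOf]
        exact fun hcc => hc hcc.symm
      rw [show PySem.Chars.splitOnMax.go ['='] (f+1) 1 (c :: rest) cur acc
            = PySem.Chars.splitOnMax.go ['='] f 1 rest (c :: cur) acc from by
          simp [PySem.Chars.splitOnMax.go, hpre]]
      rw [ih f (c :: cur) (fun hm => h (List.mem_cons_of_mem _ hm))
            (by simpa using Nat.le_of_succ_le_succ hf)]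
      simp

-- go on a remainder whose first separator splits it as pre ++ '=' :: rest
theorem pco_go_yes (pre rest : List Char) (fuel : Nat) (cur : List Char)
    (acc : List (List Char)) (h : '=' ∉ pre) (hf : pre.length < fuel) :
    PySem.Chars.splitOnMax.go ['='] fuel 1 (pre ++ '=' :: rest) cur acc =
      (rest :: (cur.reverse ++ pre) :: acc).reverse := by
  induction pre generalizing fuel cur with
  | nil =>
    cases fuel with
    | zero => simp at hf
    | succ f =>
      have hpre : (['='] : List Char).isPrefixOf ('=' :: rest) = true := by
        simp [List.isPrefixOf]
      rw [show PySem.Chars.splitOnMax.go ['='] (f+1) 1 ([] ++ '=' :: rest) cur acc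
            = PySem.Chars.splitOnMax.go ['='] f 0 rest [] (cur.reverse :: acc) from by
          simp [PySem.Chars.splitOnMax.go, hpre]]
      rw [pco_go_zero]
      simp
  | cons c pre' ih =>
    cases fuel with
    | zero => simp at hf
    | succ f =>
      have hc : c ≠ '=' := fun hcc => h (hcc ▸ List.mem_cons_self ..)
      have hpre : (['='] : List Char).isPrefixOf (c :: (pre' ++ '=' :: rest)) = false := by
        simp [List.isPrefixOf]
        exact fun hcc => hc hcc.symm
      rw [show PySem.Chars.splitOnMax.go ['='] (f+1) 1 ((c :: pre') ++ '=' :: rest) cur acc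
            = PySem.Chars.splitOnMax.go ['='] f 1 (pre' ++ '=' :: rest) (c :: cur) acc from by
          simp [PySem.Chars.splitOnMax.go, hpre]]
      rw [ih f (c :: cur) (fun hm => h (List.mem_cons_of_mem _ hm))
            (by simpa using Nat.lt_of_succ_lt_succ hf)]
      simp

theorem pco_splitOnMax_no (cs : List Char) (h : '=' ∉ cs) :
    PySem.Chars.splitOnMax cs ['='] 1 = [cs] := by
  unfold PySem.Chars.splitOnMax
  rw [if_neg (by norm_num), show (1 : Int).toNat = 1 from rfl]
  rw [pco_go_no cs (cs.length + 1) [] [] h (Nat.le_succ _)]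
  simp

theorem pco_splitOnMax_yes (pre rest : List Char) (h : '=' ∉ pre) :
    PySem.Chars.splitOnMax (pre ++ '=' :: rest) ['='] 1 = [pre, rest] := by
  unfold PySem.Chars.splitOnMax
  rw [if_neg (by norm_num), show (1 : Int).toNat = 1 from rfl]
  rw [pco_go_yes pre rest _ [] [] h (by simp)]
  simp

-- first-occurrence decomposition of a list containing '='
theorem pco_first_split (cs : List Char) (h : '=' ∈ cs) :
    ∃ pre rest, cs = pre ++ '=' :: rest ∧ '=' ∉ pre := by
  induction cs with
  | nil => simp at h
  | cons c cs' ih =>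
    by_cases hc : c = '='
    · exact ⟨[], cs', by simp [hc], by simp⟩
    · have : '=' ∈ cs' := by
        rcases List.mem_cons.mp h with h1 | h1
        · exact absurd h1.symm hc
        · exact h1
      obtain ⟨pre, rest, he, hn⟩ := ih this
      exact ⟨c :: pre, rest, by simp [he], by
        simp [hn]
        exact fun hcc => hc hcc.symm⟩

-- (kw ++ '=') is a prefix of (pre ++ '=' :: rest) iff kw = pre, when neither contains '='
theorem pco_prefix_kw (kw pre rest : List Char) (hkw : '=' ∉ kw) (hpre : '=' ∉ pre) :
    ((kw ++ ['=']) <+: (pre ++ '=' :: rest)) ↔ kw = pre := by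
  induction kw generalizing pre with
  | nil =>
    cases pre with
    | nil => simp
    | cons b pre' =>
      simp only [List.nil_append]
      constructor
      · intro hp
        obtain ⟨t, ht⟩ := hp
        have hb : b = '=' := by
          have := congrArg (List.head?) ht
          simpa using this.symm
        exact absurd (by rw [hb]; exact List.mem_cons_self .. : '=' ∈ b :: pre') hpre
      · intro hp; simp at hp
  | cons a kw' ih =>
    cases pre with
    | nil =>
      constructor
      · intro hp
        obtain ⟨t, ht⟩ := hp
        have ha : a = '=' := by
          have := congrArg (List.head?) ht
          simpa using this
        exact absurd (by rw [ha]; exact List.mem_cons_self .. : '=' ∈ a :: kw') hkw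
      · intro hp; simp at hp
    | cons b pre' =>
      have h1 : '=' ∉ kw' := fun hm => hkw (List.mem_cons_of_mem _ hm)
      have h2 : '=' ∉ pre' := fun hm => hpre (List.mem_cons_of_mem _ hm)
      constructor
      · intro hp
        have hab : a = b ∧ ((kw' ++ ['=']) <+: (pre' ++ '=' :: rest)) := by
          simpa using hp
        rw [hab.1, (ih pre' h1 h2).mp hab.2]
      · intro hp
        injection hp with hab htl
        subst hab; subst htl
        exact ⟨rest, by simp⟩

-- startswith against 'kw=' on a line whose first '=' splits it as pre/rest
theorem pco_starts (pre rest kw : List Char) (hkw : '=' ∉ kw) (hpre : '=' ∉ pre) :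
    PySem.Chars.startswith (pre ++ '=' :: rest) (kw ++ ['=']) = decide (pre = kw) := by
  rcases Bool.eq_false_or_eq_true
    (PySem.Chars.startswith (pre ++ '=' :: rest) (kw ++ ['='])) with hb | hb
  · rw [hb]; symm
    simp only [decide_eq_true_eq]
    exact ((pco_prefix_kw kw pre rest hkw hpre).mp
      ((PySem.Chars.startswith_iff _ _).mp hb)).symm
  · rw [hb]; symm
    simp only [decide_eq_false_iff_not]
    intro hkeq
    have hpf : (kw ++ ['=']) <+: (pre ++ '=' :: rest) :=
      (pco_prefix_kw kw pre rest hkw hpre).mpr hkeq.symm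
    rw [(PySem.Chars.startswith_iff _ _).mpr hpf] at hb
    cases hb

-- the per-line step: A's state and B's table lookups stay in sync
theorem pco_step (st : Option String × Option String) (t : PySem.Dict String String)
    (line : String)
    (h1 : st.1 = t.get? "classification") (h2 : st.2 = t.get? "justification") :
    (pcoStepA st line).1 = (pcoStepB t line).get? "classification" ∧
    (pcoStepA st line).2 = (pcoStepB t line).get? "justification" := by
  have hsplit : PySem.Str.splitMax? line "=" 1 =
      some ((PySem.Chars.splitOnMax line.toList ['='] 1).map String.ofList) := by
    simp [PySem.Str.splitMax?, PySem.Chars.splitMax?]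
  by_cases hm : '=' ∈ line.toList
  · obtain ⟨pre, rest, he, hn⟩ := pco_first_split _ hm
    have hsm : PySem.Chars.splitOnMax line.toList ['='] 1 = [pre, rest] := by
      rw [he]; exact pco_splitOnMax_yes pre rest hn
    have hB : pcoStepB t line =
        t.insert (PySem.Str.lower (String.ofList pre)) (PySem.Str.strip (String.ofList rest)) := by
      unfold pcoStepB
      rw [hsplit, hsm]
      rfl
    have hval : pcoValue line = PySem.Str.strip (String.ofList rest) := by
      unfold pcoValue
      rw [hsplit, hsm]
      simp [PySem.List.pyGet?, PySem.List.pyIdx?]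
    have hnl : '=' ∉ PySem.Chars.lower pre := fun hx => hn (pco_mem_lower hx)
    have hlow : (PySem.Str.lower line).toList =
        PySem.Chars.lower pre ++ '=' :: PySem.Chars.lower rest := by
      rw [PySem.Str.toList_lower, he, pco_lower_append]
    have hC : PySem.Str.startswith (PySem.Str.lower line) "classification=" =
        decide (PySem.Chars.lower pre = "classification".toList) := by
      rw [PySem.Str.startswith_eq, hlow,
        show ("classification=".toList : List Char) = "classification".toList ++ ['='] by decide]
      exact pco_starts _ _ _ (by decide) hnl
    have hJ : PySem.Str.startswith (PySem.Str.lower line) "justification=" =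
        decide (PySem.Chars.lower pre = "justification".toList) := by
      rw [PySem.Str.startswith_eq, hlow,
        show ("justification=".toList : List Char) = "justification".toList ++ ['='] by decide]
      exact pco_starts _ _ _ (by decide) hnl
    have hkeyC : PySem.Str.lower (String.ofList pre) = "classification" ↔
        PySem.Chars.lower pre = "classification".toList := by
      constructor
      · intro hx
        have := congrArg String.toList hx
        simpa [PySem.Str.toList_lower] using this
      · intro hx
        apply String.toList_inj.mp
        simpa [PySem.Str.toList_lower] using hx
    have hkeyJ : PySem.Str.lower (String.ofList pre) = "justification" ↔
        PySem.Chars.lower pre = "justification".toList := by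
      constructor
      · intro hx
        have := congrArg String.toList hx
        simpa [PySem.Str.toList_lower] using this
      · intro hx
        apply String.toList_inj.mp
        simpa [PySem.Str.toList_lower] using hx
    unfold pcoStepA
    rw [hB, hC, hJ, hval]
    by_cases hc : PySem.Chars.lower pre = "classification".toList
    · rw [hkeyC.mpr hc]
      simp [hc, PySem.Dict.get?_insert_self,
        PySem.Dict.get?_insert_of_ne _ _ (by decide : ("justification" : String) ≠ "classification"), h2]

    · by_cases hj : PySem.Chars.lower pre = "justification".toList
      · rw [hkeyJ.mpr hj]
        simp [hj, PySem.Dict.get?_insert_self,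
          PySem.Dict.get?_insert_of_ne _ _ (by decide : ("classification" : String) ≠ "justification"), h1]
      · have hk1 : ("classification" : String) ≠ PySem.Str.lower (String.ofList pre) :=
          fun hx => hc (hkeyC.mp hx.symm)
        have hk2 : ("justification" : String) ≠ PySem.Str.lower (String.ofList pre) :=
          fun hx => hj (hkeyJ.mp hx.symm)
        rw [if_neg (by simpa using hc), if_neg (by simpa using hj),
          PySem.Dict.get?_insert_of_ne _ _ hk1, PySem.Dict.get?_insert_of_ne _ _ hk2]
        exact ⟨h1, h2⟩
  · -- no '=' in the line: A's guards are both false, B's split has one part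
    have hsm : PySem.Chars.splitOnMax line.toList ['='] 1 = [line.toList] :=
      pco_splitOnMax_no _ hm
    have hB : pcoStepB t line = t := by
      unfold pcoStepB
      rw [hsplit, hsm]
      rfl
    have hml : '=' ∉ (PySem.Str.lower line).toList := by
      rw [PySem.Str.toList_lower]
      exact fun hx => hm (pco_mem_lower hx)
    have hC : PySem.Str.startswith (PySem.Str.lower line) "classification=" = false := by
      rw [PySem.Str.startswith_eq]
      rcases Bool.eq_false_or_eq_true (PySem.Chars.startswith (PySem.Str.lower line).toList
        "classification=".toList) with hb | hb
      · exfalso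
        have := (PySem.Chars.startswith_iff _ _).mp hb
        exact hml (this.mem (by decide : '=' ∈ "classification=".toList))
      · exact hb
    have hJ : PySem.Str.startswith (PySem.Str.lower line) "justification=" = false := by
      rw [PySem.Str.startswith_eq]
      rcases Bool.eq_false_or_eq_true (PySem.Chars.startswith (PySem.Str.lower line).toList
        "justification=".toList) with hb | hb
      · exfalso
        have := (PySem.Chars.startswith_iff _ _).mp hb
        exact hml (this.mem (by decide : '=' ∈ "justification=".toList))
      · exact hb
    unfold pcoStepA
    rw [hB, hC, hJ]
    simp [h1, h2]

-- the loop invariant, over any list of lines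
theorem pco_fold (lines : List String) (st : Option String × Option String)
    (t : PySem.Dict String String)
    (h1 : st.1 = t.get? "classification") (h2 : st.2 = t.get? "justification") :
    (lines.foldl pcoStepA st).1 = (lines.foldl pcoStepB t).get? "classification" ∧
    (lines.foldl pcoStepA st).2 = (lines.foldl pcoStepB t).get? "justification" := by
  induction lines generalizing st t with
  | nil => exact ⟨h1, h2⟩
  | cons line rest ih =>
    obtain ⟨g1, g2⟩ := pco_step st t line h1 h2
    exact ih _ _ g1 g2

-- the some-text case of the equivalence
theorem pco_main (text : String) :
    ((PySem.Str.split? (PySem.Str.strip text) "\n").getD []).foldl pcoStepA (none, none) =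
      ((pcoTable ((PySem.Str.split? (PySem.Str.strip text) "\n").getD [])).get? "classification",
       (pcoTable ((PySem.Str.split? (PySem.Str.strip text) "\n").getD [])).get? "justification") := by
  unfold pcoTable
  generalize ((PySem.Str.split? (PySem.Str.strip text) "\n").getD []) = L
  obtain ⟨g1, g2⟩ := pco_fold L (none, none) PySem.Dict.empty rfl rfl
  exact Prod.ext g1 g2

-- ===== VERDICT (by name: the statement is the Claim_ definition above) =====
theorem parse_classifier_output_spec : Claim_equal_parse_classifier_output := by
  unfold Claim_equal_parse_classifier_output
  intro output _ _
  unfold Spec_parse_classifier_output parse_classifier_output parse_classifier_output_alt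
  cases (PySem.Dict.ofList output).get? "text" with
  | none => rfl
  | some text => exact pco_main text
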